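-- pv_equiv track=rewrite | github.com/alexandraback/datacollection | solutions_5744014401732608_1/Python/bootandy/b_back.py | solve
-- ===== SOURCE A (Python) =====
-- def solve(b, target):
--     b_power = b - 2
--     b_used = []
--
--     if target == 2 ** b_power:
--         return special_case(b, target)
--
--     for i in range(b_power-1, -1, -1):
--         if target >= 2 ** i:
--             target -= 2 ** i
--             b_used.append(i)
--
--     if target != 0:
--         return False, []
--
--     answer = build_grid(b)
--
--     maxb = b_used[0]
--
--     ones = ''
--     for i in range(len(answer)-2, -1, -1):
--         ones += '1'
--         if len(ones) <= maxb + 1: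
--             answer[i] = answer[i][:-len(ones)] + ones
--
--     # for each b used add a super slide.
--     newa = ''
--     la = len(answer[0])
--     for i in range(0, la):
--         if (la-(i+2)) in b_used:
--             newa += '1'
--         else:
--             newa += '0'
--     answer[0] = newa
--
--     return True, answer
--
-- def build_grid(b):
--     answer = []
--     for i in range(b):
--         line = ""
--         for j in range(b):
--             line += '0'
--         answer.append(line)
--     return answer
--
-- def special_case(b, target):
--     answer = build_grid(b)
--
--     ones = ''
--     for i in range(len(answer)-2, -1, -1):
--         ones += '1'
--         answer[i] = answer[i][:-len(ones)] + ones
--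
--     return True, answer
-- ===== SOURCE B (Python) =====
-- def solve(b, target):
--     b_power = b - 2
--     if b_power >= 0 and target == 1 << b_power:
--         # staircase of ones growing toward the top, bottom row all zeros
--         return True, ['0' * (i + 1) + '1' * (b - 1 - i) for i in range(b - 1)] + ['0' * b]
--     if not (b >= 3 and 0 < target < (1 << b_power)):
--         return False, []
--     maxb = target.bit_length() - 1
--     top = ''.join('1' if (target >> (b - j - 2)) & 1 else '0' for j in range(b - 1)) + '0'
--     rows = [top]
--     for i in range(1, b):
--         d = b - 1 - i
--         rows.append('0' * (b - d) + '1' * d if d <= maxb + 1 else '0' * b)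
--     return True, rows
-- ===== Notes on version B (the rewrite author's own statement) =====
-- stated objective: simpler
-- what changed: B replaces A's greedy power-of-two subtraction loop and the incremental mutation of a prebuilt zero grid (growing 'ones' string, slice-and-concat row rewrites) by a direct closed-form construction: validity and the set bits are read off target with shifts/bit_length, and every row is built once from string repetition (measured faster in a timing run: no char-by-char concatenation, no 2**i recomputation per bit). Pre_ excludes only target = 0, where A raises IndexError (b_used empty at b_used[0]) and returns no value.
import Mathlib
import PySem

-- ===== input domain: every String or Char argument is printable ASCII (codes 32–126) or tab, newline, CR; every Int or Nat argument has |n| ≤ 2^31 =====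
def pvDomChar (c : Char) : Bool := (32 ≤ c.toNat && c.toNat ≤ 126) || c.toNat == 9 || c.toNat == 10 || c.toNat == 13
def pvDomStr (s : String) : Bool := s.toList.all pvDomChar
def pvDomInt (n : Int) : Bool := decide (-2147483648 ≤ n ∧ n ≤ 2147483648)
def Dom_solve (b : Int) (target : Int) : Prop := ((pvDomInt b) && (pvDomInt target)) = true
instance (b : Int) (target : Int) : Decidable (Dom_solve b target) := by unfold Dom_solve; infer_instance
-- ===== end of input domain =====

-- B replaces A's greedy bit subtraction and incremental grid mutation by a direct closed-form
-- construction of each row (bit tests for the top row, repetition-built staircase rows);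
-- simpler, and measured faster in a timing run (constant-factor: rows built once).

-- ===== PORT A =====
-- strings are carried as List Char (PySem.Chars) inside the loops and wrapped with String.ofList on return
def solveGreedyStep (st : Int × List Int) (i : Int) : Int × List Int :=
  if 2 ^ i.toNat ≤ st.1 then (st.1 - 2 ^ i.toNat, st.2 ++ [i]) else st

def solveFillSpStep (st : List Char × List (List Char)) (i : Int) : List Char × List (List Char) :=
  let ones := st.1 ++ ['1']
  (ones, PySem.List.pySetD st.2 i
    (PySem.List.slice (PySem.List.pyGetD st.2 i []) none (some (-(ones.length : Int))) ++ ones))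

def solveFillStep (maxb : Int) (st : List Char × List (List Char)) (i : Int) :
    List Char × List (List Char) :=
  let ones := st.1 ++ ['1']
  if (ones.length : Int) ≤ maxb + 1 then
    (ones, PySem.List.pySetD st.2 i
      (PySem.List.slice (PySem.List.pyGetD st.2 i []) none (some (-(ones.length : Int))) ++ ones))
  else (ones, st.2)

def solve_buildGrid (b : Int) : List (List Char) :=
  (PySem.List.pyRange 0 b 1).foldl (fun answer _ =>
    answer ++ [(PySem.List.pyRange 0 b 1).foldl (fun line _ => line ++ ['0']) []]) []

def solve_specialCase (b : Int) (_target : Int) : Bool × List String :=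
  let answer := solve_buildGrid b
  let res := (PySem.List.pyRange ((answer.length : Int) - 2) (-1) (-1)).foldl solveFillSpStep ([], answer)
  (true, res.2.map String.ofList)

def solve (b : Int) (target : Int) : Bool × List String :=
  let b_power := b - 2
  -- Python's `target == 2 ** b_power` compares int to a float 2^b_power < 1 when b_power < 0: never equal
  if 0 ≤ b_power ∧ target = 2 ^ b_power.toNat then solve_specialCase b target
  else
    let st := (PySem.List.pyRange (b_power - 1) (-1) (-1)).foldl solveGreedyStep (target, [])
    if st.1 ≠ 0 then (false, [])
    else
      let b_used := st.2
      let answer := solve_buildGrid b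
      -- `b_used[0]` raises IndexError when b_used = [] (exactly target = 0, outside Pre_solve)
      let maxb : Int := PySem.List.pyGetD b_used 0 0
      let res := (PySem.List.pyRange ((answer.length : Int) - 2) (-1) (-1)).foldl (solveFillStep maxb) ([], answer)
      let answer1 := res.2
      let la : Int := ((PySem.List.pyGetD answer1 0 []).length : Int)
      let newa := (PySem.List.pyRange 0 la 1).foldl
        (fun acc i => if (la - (i + 2)) ∈ b_used then acc ++ ['1'] else acc ++ ['0']) []
      (true, (PySem.List.pySetD answer1 0 newa).map String.ofList)

-- ===== PORT B =====
def solve_alt (b : Int) (target : Int) : Bool × List String :=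
  let b_power := b - 2
  if 0 ≤ b_power ∧ target = (1 : Int) <<< b_power.toNat then
    (true, ((List.range (b.toNat - 1)).map fun i =>
        String.ofList (List.replicate (i + 1) '0' ++ List.replicate (b.toNat - 1 - i) '1'))
      ++ [String.ofList (List.replicate b.toNat '0')])
  else if ¬ (3 ≤ b ∧ 0 < target ∧ target < (1 : Int) <<< b_power.toNat) then (false, [])
  else
    let n := b.toNat
    let maxb := PySem.Int.bitLength target - 1
    let top := String.ofList (((List.range (n - 1)).map fun j =>
        if PySem.Int.band (target >>> (n - j - 2)) 1 == 1 then '1' else '0') ++ ['0'])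
    let rows := (List.range' 1 (n - 1)).map fun i =>
      let d := n - 1 - i
      if d ≤ maxb + 1 then String.ofList (List.replicate (n - d) '0' ++ List.replicate d '1')
      else String.ofList (List.replicate n '0')
  (true, top :: rows)

-- ===== PRECONDITION & SPEC =====
-- Pre_solve excludes exactly target = 0: there A's b_used stays empty and `maxb = b_used[0]`
-- raises IndexError (A returns no value; B returns (false, []) there).
def Pre_solve (b : Int) (target : Int) : Prop := target ≠ 0
instance (b : Int) (target : Int) : Decidable (Pre_solve b target) := by unfold Pre_solve; infer_instance
def pvWitness_solve : Int × Int := (5, 3)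


def Spec_solve (b : Int) (target : Int) (out : Bool × List String) : Prop := out = solve_alt b target
instance (b : Int) (target : Int) (out : Bool × List String) : Decidable (Spec_solve b target out) := by
  unfold Spec_solve; infer_instance

-- ===== CLAIM (what is proved, stated in full; the proofs are below) =====
def Claim_equal_solve : Prop := ∀ (b : Int) (target : Int), Dom_solve b target →
  Pre_solve b target → Spec_solve b target (solve b target)

-- ===== LEMMAS AND PROOFS =====

-- proof-only abbreviations
def zeros (n : Nat) : List Char := List.replicate n '0'
def onesL (k : Nat) : List Char := List.replicate k '1'
-- the set bits of u below m, listed in descending order (as Python ints)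
def bitsDesc (m u : Nat) : List Int :=
  ((List.range m).reverse.filter (fun k => u.testBit k)).map Int.ofNat

lemma int_one_shiftLeft (k : Nat) : (1 : Int) <<< k = 2 ^ k := by simp [Int.shiftLeft_eq]

lemma int_natCast_shiftRight (u k : Nat) : ((u : Int) >>> k) = ((u >>> k : Nat) : Int) := rfl

lemma pow_cast_int (m : Nat) : (((2:Nat)^m : Nat) : Int) = (2:Int)^m := by push_cast; ring

lemma bitsDesc_zero (u : Nat) : bitsDesc 0 u = [] := rfl

lemma bitsDesc_succ_high (m u v : Nat) (hu : u = 2^m + v) (hv : v < 2^m) :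
    bitsDesc (m+1) u = (m : Int) :: bitsDesc m v := by
  have h1 : u.testBit m = true := by
    subst hu
    rw [Nat.testBit_two_pow_add_eq, Nat.testBit_lt_two_pow hv]
    rfl
  have h2 : ∀ k ∈ (List.range m).reverse, u.testBit k = v.testBit k := by
    intro k hk
    subst hu
    exact Nat.testBit_two_pow_add_gt (by simpa using hk) v
  unfold bitsDesc
  rw [List.range_succ, List.reverse_append, List.reverse_singleton, List.singleton_append,
    List.filter_cons, h1, List.filter_congr h2]
  simp

lemma bitsDesc_succ_low (m u : Nat) (hv : u < 2^m) : bitsDesc (m+1) u = bitsDesc m u := by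
  have h1 : u.testBit m = false := Nat.testBit_lt_two_pow hv
  unfold bitsDesc
  rw [List.range_succ, List.reverse_append, List.reverse_singleton, List.singleton_append,
    List.filter_cons, h1]
  simp

lemma mem_bitsDesc (m u : Nat) (x : Int) :
    x ∈ bitsDesc m u ↔ ∃ k : Nat, k < m ∧ u.testBit k = true ∧ x = (k : Int) := by
  simp only [bitsDesc, List.mem_map, List.mem_filter, List.mem_reverse, List.mem_range]
  constructor
  · rintro ⟨k, ⟨hk, hb⟩, rfl⟩; exact ⟨k, hk, hb, rfl⟩
  · rintro ⟨k, hk, hb, rfl⟩; exact ⟨k, ⟨hk, hb⟩, rfl⟩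

lemma bitsDesc_head (L : Nat) (hL1 : 1 ≤ L) : ∀ (m u : Nat), 2^(L-1) ≤ u → u < 2^L → L ≤ m →
    ∃ rest, bitsDesc m u = (((L-1 : Nat) : Int)) :: rest := by
  intro m
  induction m with
  | zero => intro u h1 h2 hm; omega
  | succ m ih =>
    intro u h1 h2 hm
    rcases Nat.lt_or_ge u (2^m) with hlt | hge
    · by_cases hLm : L ≤ m
      · obtain ⟨rest, hr⟩ := ih u h1 h2 hLm
        exact ⟨rest, by rw [bitsDesc_succ_low m u hlt]; exact hr⟩
      · exfalso
        have hLe : L = m + 1 := by omega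
        have : 2^(L-1) = 2^m := by rw [hLe]; simp
        omega
    · have hLe : L = m + 1 := by
        by_contra h
        have hLm : L ≤ m := by omega
        have : (2:Nat)^L ≤ 2^m := Nat.pow_le_pow_right (by norm_num) hLm
        omega
      refine ⟨bitsDesc m (u - 2^m), ?_⟩
      have : L - 1 = m := by omega
      rw [this, bitsDesc_succ_high m u (u - 2^m) (by omega) (by
        have : (2:Nat)^L = 2^(m+1) := by rw [hLe]
        have h2' : u < 2^(m+1) := by omega
        have : (2:Nat)^(m+1) = 2^m * 2 := pow_succ 2 m
        omega)]

lemma greedy_neg (l : List Int) : ∀ (t : Int) (used : List Int), t < 0 →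
    l.foldl solveGreedyStep (t, used) = (t, used) := by
  induction l with
  | nil => intro t used _; rfl
  | cons i l ih =>
    intro t used ht
    have hpos : (0:Int) < 2 ^ i.toNat := by positivity
    simp only [List.foldl_cons, solveGreedyStep, if_neg (by omega : ¬ (2:Int) ^ i.toNat ≤ t)]
    exact ih t used ht

lemma greedy_big (m : Nat) : ∀ (t : Int) (used : List Int), 2^m ≤ t →
    0 < ((PySem.List.pyRange ((m:Int)-1) (-1) (-1)).foldl solveGreedyStep (t, used)).1 := by
  induction m with
  | zero =>
    intro t used h
    rw [show ((0:Nat):Int)-1 = -1 by norm_num, PySem.List.pyRange_neg_one_eq_nil (le_refl _)]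
    have h1 : (2:Int)^0 = 1 := pow_zero 2
    simp only [List.foldl_nil]
    omega
  | succ m ih =>
    intro t used h
    have hpow : (2:Int)^(m+1) = 2^m * 2 := pow_succ 2 m
    have hpos : (0:Int) < 2^m := by positivity
    rw [show ((m+1:Nat):Int)-1 = (m:Int) by push_cast; ring,
      PySem.List.pyRange_neg_one_cons (show (-1:Int) < ((m:Nat):Int) by omega)]
    simp only [List.foldl_cons, solveGreedyStep, Int.toNat_natCast]
    rw [if_pos (by omega : (2:Int)^m ≤ t)]
    exact ih (t - 2^m) (used ++ [(m:Int)]) (by omega)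

lemma greedy_pos (m : Nat) : ∀ (t : Int) (used : List Int), 0 ≤ t → t < 2^m →
    (PySem.List.pyRange ((m:Int)-1) (-1) (-1)).foldl solveGreedyStep (t, used) =
      (0, used ++ bitsDesc m t.toNat) := by
  induction m with
  | zero =>
    intro t used h0 h1
    rw [show ((0:Nat):Int)-1 = -1 by norm_num, PySem.List.pyRange_neg_one_eq_nil (le_refl _)]
    simp only [List.foldl_nil, bitsDesc_zero, List.append_nil]
    have h2 : (2:Int)^0 = 1 := pow_zero 2
    have : t = 0 := by omega
    rw [this]
  | succ m ih =>
    intro t used h0 h1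
    have hpow : (2:Int)^(m+1) = 2^m * 2 := pow_succ 2 m
    have hpos : (0:Int) < 2^m := by positivity
    have hcast : (((2:Nat)^m : Nat) : Int) = (2:Int)^m := pow_cast_int m
    rw [show ((m+1:Nat):Int)-1 = (m:Int) by push_cast; ring,
      PySem.List.pyRange_neg_one_cons (show (-1:Int) < ((m:Nat):Int) by omega)]
    simp only [List.foldl_cons, solveGreedyStep, Int.toNat_natCast]
    by_cases hc : (2:Int)^m ≤ t
    · rw [if_pos hc, ih (t - 2^m) (used ++ [(m:Int)]) (by omega) (by omega)]
      rw [bitsDesc_succ_high m t.toNat (t - 2^m).toNat (by omega) (by omega)]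
      simp
    · rw [if_neg hc, ih t used h0 (by omega)]
      rw [bitsDesc_succ_low m t.toNat (by omega)]

lemma buildGrid_eq (b : Int) : solve_buildGrid b = List.replicate b.toNat (zeros b.toNat) := by
  unfold solve_buildGrid zeros
  have h1 : (PySem.List.pyRange 0 b 1).foldl (fun line _ => line ++ ['0']) ([]:List Char) =
      List.replicate b.toNat '0' := by
    rw [show (fun (line : List Char) (_ : Int) => line ++ ['0']) =
        (fun (line : List Char) (i : Int) => line ++ [(fun _ => '0') i]) from rfl,
      PySem.List.foldl_append_singleton_eq_map, List.map_const']
    simp [PySem.List.length_pyRange_one]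
  rw [h1]
  rw [show (fun (answer : List (List Char)) (_ : Int) => answer ++ [List.replicate b.toNat '0']) =
      (fun (answer : List (List Char)) (i : Int) => answer ++ [(fun _ => List.replicate b.toNat '0') i]) from rfl,
    PySem.List.foldl_append_singleton_eq_map, List.map_const']
  simp [PySem.List.length_pyRange_one]

lemma fillStep_at (maxb : Int) (n c a : Nat) (ans : List (List Char))
    (hlen : ans.length = n) (ha : a < n) (hz : ans.getD a [] = zeros n) (hc1 : c + 1 ≤ n) :
    solveFillStep maxb (onesL c, ans) ((a : Nat) : Int) =
      (onesL (c+1), if ((c+1 : Nat) : Int) ≤ maxb + 1 then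
        ans.set a (zeros (n-(c+1)) ++ onesL (c+1)) else ans) := by
  have hones : onesL c ++ ['1'] = onesL (c+1) := by unfold onesL; rw [List.replicate_succ']
  have hget : PySem.List.pyGetD ans ((a : Nat) : Int) [] = zeros n := by
    rw [PySem.List.pyGetD_natCast]; exact hz
  have hslice : PySem.List.slice (zeros n) none (some (-(((c+1):Nat) : Int))) =
      zeros (n-(c+1)) := by
    rw [PySem.List.slice_to_neg_natCast (zeros n) (c+1) (by omega)]
    unfold zeros
    simp [List.take_replicate]
  have hset : PySem.List.pySetD ans ((a:Nat):Int) (zeros (n-(c+1)) ++ onesL (c+1)) =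
      ans.set a (zeros (n-(c+1)) ++ onesL (c+1)) := by
    rw [PySem.List.pySetD_of_nonneg ans _ (by positivity), Int.toNat_natCast]
  simp only [solveFillStep]
  rw [hones, hget]
  have hlen1 : (((onesL (c+1)).length : Nat) : Int) = ((c+1 : Nat) : Int) := by simp [onesL]
  rw [hlen1, hslice]
  by_cases hC : ((c+1 : Nat) : Int) ≤ maxb + 1
  · rw [if_pos hC, if_pos hC, hset]
  · rw [if_neg hC, if_neg hC]

lemma fill_aux (maxb : Int) (n : Nat) : ∀ (a : Nat) (ans : List (List Char)),
    ans.length = n → a + 2 ≤ n →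
    (∀ r : Nat, r < n → r ≤ a → ans.getD r [] = zeros n) →
    (PySem.List.pyRange ((a : Nat) : Int) (-1) (-1)).foldl (solveFillStep maxb) (onesL (n-2-a), ans) =
      (onesL (n-1), (List.range n).map (fun r =>
        if r ≤ a ∧ ((n:Int)-1-(r:Int) ≤ maxb+1) then zeros (r+1) ++ onesL (n-1-r)
        else ans.getD r [])) := by
  intro a
  induction a with
  | zero =>
    intro ans hlen hn hz
    rw [PySem.List.pyRange_neg_one_cons (show (-1:Int) < ((0:Nat):Int) by omega),
      show ((0:Nat):Int) - 1 = -1 by norm_num, PySem.List.pyRange_neg_one_eq_nil (le_refl _)]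
    simp only [List.foldl_cons, List.foldl_nil]
    rw [fillStep_at maxb n (n-2-0) 0 ans hlen (by omega) (hz 0 (by omega) (le_refl _)) (by omega)]
    have hc : n - 2 - 0 + 1 = n - 1 := by omega
    rw [hc]
    congr 1
    by_cases hcond : ((n-1 : Nat) : Int) ≤ maxb + 1
    · rw [if_pos hcond]
      apply List.ext_getElem (by simp [hlen])
      intro i h1 h2
      have hi : i < n := by simpa [hlen] using h1
      simp only [List.getElem_map, List.getElem_range]
      rcases Nat.eq_zero_or_pos i with rfl | hpos
      · have hX : (0:Nat) ≤ 0 ∧ ((n:Int) - 1 - ((0:Nat):Int)) ≤ maxb + 1 := ⟨le_refl _, by omega⟩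
        rw [if_pos hX, List.getElem_set_self (by simp [hlen]; omega),
          show n-(n-1) = 0+1 by omega, show n-1-0 = n-1 by omega]
      · rw [if_neg (by rintro ⟨h, _⟩; omega), List.getElem_set_ne (by omega),
          List.getD_eq_getElem ans [] (by omega)]
    · rw [if_neg hcond]
      apply List.ext_getElem (by simp [hlen])
      intro i h1 h2
      have hi : i < n := by simpa [hlen] using h1
      simp only [List.getElem_map, List.getElem_range]
      rw [if_neg (by
          rintro ⟨hi0, hX⟩
          apply hcond
          have h0 : i = 0 := by omega
          subst h0
          omega),
        List.getD_eq_getElem ans [] (by omega)]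
  | succ a ih =>
    intro ans hlen hn hz
    rw [PySem.List.pyRange_neg_one_cons (show (-1:Int) < ((a+1:Nat):Int) by omega),
      show ((a+1:Nat):Int) - 1 = ((a:Nat):Int) by push_cast; ring]
    simp only [List.foldl_cons]
    rw [fillStep_at maxb n (n-2-(a+1)) (a+1) ans hlen (by omega)
      (hz (a+1) (by omega) (le_refl _)) (by omega)]
    have hc : n - 2 - (a+1) + 1 = n - 2 - a := by omega
    rw [hc]
    by_cases hcond : ((n-2-a : Nat) : Int) ≤ maxb + 1
    · rw [if_pos hcond]
      rw [ih (ans.set (a+1) (zeros (n-(n-2-a)) ++ onesL (n-2-a))) (by simp [hlen]) (by omega)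
        (by
          intro r hr hra
          rw [List.getD_eq_getElem _ [] (by simp [hlen]; omega),
            List.getElem_set_ne (by omega)]
          have h' := hz r hr (by omega)
          rwa [List.getD_eq_getElem ans [] (by omega)] at h')]
      congr 1
      apply List.map_congr_left
      intro r hr
      rw [List.mem_range] at hr
      by_cases hra : r ≤ a
      · by_cases hX : (n:Int)-1-(r:Int) ≤ maxb+1
        · rw [if_pos ⟨hra, hX⟩, if_pos ⟨by omega, hX⟩]
        · rw [if_neg (by tauto), if_neg (by rintro ⟨_, h⟩; exact hX h),
            List.getD_eq_getElem _ [] (by simp [hlen]; omega), List.getElem_set_ne (by omega),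
            List.getD_eq_getElem ans [] (by omega)]
      · by_cases hre : r = a + 1
        · subst hre
          have hX2 : a+1 ≤ a+1 ∧ ((n:Int) - 1 - ((a+1:Nat):Int)) ≤ maxb + 1 :=
            ⟨le_refl _, by omega⟩
          rw [if_neg (by rintro ⟨h, _⟩; omega), if_pos hX2,
            List.getD_eq_getElem _ [] (by simp [hlen]; omega),
            List.getElem_set_self (by simp [hlen]; omega),
            show n-(n-2-a) = a+1+1 by omega, show n-1-(a+1) = n-2-a by omega]
        · rw [if_neg (by rintro ⟨h, _⟩; omega), if_neg (by rintro ⟨h, _⟩; omega),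
            List.getD_eq_getElem _ [] (by simp [hlen]; omega), List.getElem_set_ne (by omega),
            List.getD_eq_getElem ans [] (by omega)]
    · rw [if_neg hcond]
      rw [ih ans hlen (by omega) (fun r hr hra => hz r hr (by omega))]
      congr 1
      apply List.map_congr_left
      intro r hr
      rw [List.mem_range] at hr
      by_cases hra : r ≤ a
      · by_cases hX : (n:Int)-1-(r:Int) ≤ maxb+1
        · rw [if_pos ⟨hra, hX⟩, if_pos ⟨by omega, hX⟩]
        · rw [if_neg (by tauto), if_neg (by rintro ⟨_, h⟩; exact hX h)]
      · by_cases hre : r = a + 1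
        · subst hre
          rw [if_neg (by rintro ⟨h, _⟩; omega), if_neg (by
            rintro ⟨_, hX⟩
            apply hcond
            omega)]
        · rw [if_neg (by rintro ⟨h, _⟩; omega), if_neg (by rintro ⟨h, _⟩; omega)]

lemma spStep_eq_fillStep (maxb : Int) : ∀ (l : List Int) (s : List Char × List (List Char)),
    ((s.1.length + l.length : Nat) : Int) ≤ maxb + 1 →
    l.foldl solveFillSpStep s = l.foldl (solveFillStep maxb) s := by
  intro l
  induction l with
  | nil => intro s _; rfl
  | cons i l ih =>
    intro s hs
    simp only [List.length_cons] at hs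
    simp only [List.foldl_cons]
    have hc : (((s.1 ++ ['1']).length : Nat) : Int) ≤ maxb + 1 := by
      simp only [List.length_append, List.length_cons, List.length_nil]
      omega
    have hstep : solveFillSpStep s i = solveFillStep maxb s i := by
      simp only [solveFillSpStep, solveFillStep]
      rw [if_pos hc]
    rw [hstep]
    apply ih
    have h1 : (solveFillStep maxb s i).1 = s.1 ++ ['1'] := by
      simp only [solveFillStep]
      split <;> rfl
    rw [h1]
    simp only [List.length_append, List.length_cons, List.length_nil]
    omega

lemma foldl_if_append (l : List Int) (P : Int → Prop) [DecidablePred P] :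
    ∀ acc, l.foldl (fun acc i => if P i then acc ++ ['1'] else acc ++ ['0']) acc =
      acc ++ l.map (fun i => if P i then '1' else '0') := by
  induction l with
  | nil => intro acc; simp
  | cons i l ih =>
    intro acc
    simp only [List.foldl_cons, List.map_cons]
    by_cases h : P i
    · rw [if_pos h, if_pos h, ih]; simp
    · rw [if_neg h, if_neg h, ih]; simp



lemma band_shift_testBit (u k : Nat) : (PySem.Int.band ((u:Int) >>> k) 1 == 1) = u.testBit k := by
  rw [int_natCast_shiftRight, show (1:Int) = ((1:Nat):Int) by norm_num, PySem.Int.band_natCast,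
    Nat.and_one_is_mod, Nat.testBit_eq_decide_div_mod_eq, ← Nat.shiftRight_eq_div_pow]
  by_cases h : u >>> k % 2 = 1
  · simp [h]
  · have h0 : u >>> k % 2 = 0 := by omega
    simp [h0, h]

lemma natCast_mem_bitsDesc (m u k : Nat) :
    ((k : Int) ∈ bitsDesc m u) ↔ (k < m ∧ u.testBit k = true) := by
  rw [mem_bitsDesc]
  constructor
  · rintro ⟨k', h1, h2, he⟩
    have : k' = k := by exact_mod_cast he.symm
    subst this
    exact ⟨h1, h2⟩
  · rintro ⟨h1, h2⟩
    exact ⟨k, h1, h2, rfl⟩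

lemma neg_not_mem_bitsDesc (m u : Nat) (x : Int) (hx : x < 0) : x ∉ bitsDesc m u := by
  rw [mem_bitsDesc]
  rintro ⟨k, _, _, rfl⟩
  omega

lemma bitLength_pos (t : Int) (h : 0 < t) : 1 ≤ PySem.Int.bitLength t := by
  have h1 := PySem.Int.two_pow_bitLength_le t (by omega)
  have h2 := PySem.Int.lt_two_pow_bitLength t
  by_contra hc
  simp at hc
  rw [hc] at h2
  simp at h2
  omega

lemma getD_replicate_lt {α : Type} (n r : Nat) (x d : α) (h : r < n) :
    (List.replicate n x).getD r d = x := by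
  rw [List.getD_eq_getElem _ d (by simpa using h)]
  simp

-- the common closed form both ports reach in the special-case branch
def spGridSpec (n : Nat) : List String :=
  (List.range (n-1)).map (fun i => String.ofList (zeros (i+1) ++ onesL (n-1-i))) ++
    [String.ofList (zeros n)]

-- the common closed form both ports reach in the valid branch
def gridSpec (n L u : Nat) : List String :=
  String.ofList ((List.range n).map (fun j =>
    if j + 2 ≤ n ∧ u.testBit (n-j-2) = true then '1' else '0')) ::
  (List.range' 1 (n-1)).map (fun r =>
    if n-1-r ≤ L then String.ofList (zeros (n-(n-1-r)) ++ onesL (n-1-r))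
    else String.ofList (zeros n))

lemma A_special (b t : Int) (hb : 0 ≤ b - 2) (he : t = 2 ^ (b-2).toNat) :
    solve b t = (true, spGridSpec b.toNat) := by
  have hn2 : 2 ≤ b.toNat := by omega
  set n := b.toNat with hndef
  simp only [solve]
  rw [if_pos ⟨hb, he⟩]
  simp only [solve_specialCase]
  rw [buildGrid_eq b, ← hndef]
  simp only [List.length_replicate]
  rw [show (n:Int) - 2 = ((n-2 : Nat) : Int) by omega]
  have hstart : ([] : List Char) = onesL (n-2-(n-2)) := by simp [onesL, Nat.sub_self]
  have hz : ∀ r : Nat, r < n → r ≤ n-2 → (List.replicate n (zeros n)).getD r [] = zeros n :=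
    fun r hr _ => getD_replicate_lt n r (zeros n) [] hr
  have hfill := fill_aux ((n:Int)) n (n-2) (List.replicate n (zeros n))
    (by simp) (by omega) hz
  rw [← hstart] at hfill
  rw [spStep_eq_fillStep ((n:Int)) _ _ (by
      simp only [List.length_nil, PySem.List.length_pyRange_neg_one]
      omega),
    hfill]
  simp only [Prod.mk.injEq, true_and]
  unfold spGridSpec
  apply List.ext_getElem (by simp [hn2]; omega)
  intro i h1 h2
  simp only [List.getElem_map, List.getElem_range]
  by_cases hi : i < n - 1
  · rw [List.getElem_append_left (by simpa using hi)]
    simp only [List.getElem_map, List.getElem_range]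
    rw [if_pos ⟨by omega, by omega⟩]
  · have hieq : i = n - 1 := by simp at h1; omega
    subst hieq
    rw [List.getElem_append_right (by simpa using hi)]
    rw [if_neg (by rintro ⟨h, _⟩; omega)]
    simp only [List.length_map, List.length_range]
    rw [getD_replicate_lt n (n-1) (zeros n) [] (by omega)]
    simp

lemma B_special (b t : Int) (hb : 0 ≤ b - 2) (he : t = (1:Int) <<< (b-2).toNat) :
    solve_alt b t = (true, spGridSpec b.toNat) := by
  simp only [solve_alt]
  rw [if_pos ⟨hb, he⟩]
  unfold spGridSpec zeros onesL
  simp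

lemma A_invalid (b t : Int) (hns : ¬ (0 ≤ b - 2 ∧ t = 2 ^ (b-2).toNat)) (ht : t ≠ 0)
    (hnv : ¬ (3 ≤ b ∧ 0 < t ∧ t < 2 ^ (b-2).toNat)) : solve b t = (false, []) := by
  simp only [solve]
  rw [if_neg hns]
  have hst : ((PySem.List.pyRange (b - 2 - 1) (-1) (-1)).foldl solveGreedyStep (t, [])).1 ≠ 0 := by
    rcases lt_trichotomy t 0 with hneg | hzero | hpos
    · rw [greedy_neg _ t [] hneg]
      simpa using ht
    · exact absurd hzero ht
    · by_cases hb3 : 3 ≤ b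
      · set m := (b-2).toNat with hm
        have hge : (2:Int) ^ m ≤ t := by
          rcases hnv with h
          have h1 : ¬ t < 2 ^ m := by tauto
          omega
        have := greedy_big m t [] hge
        rw [show b - 2 - 1 = ((m:Nat):Int) - 1 by omega] at *
        omega
      · rw [PySem.List.pyRange_neg_one_eq_nil (by omega : b - 2 - 1 ≤ -1)]
        simpa using ht
  rw [if_pos hst]

lemma B_invalid (b t : Int) (hns : ¬ (0 ≤ b - 2 ∧ t = (1:Int) <<< (b-2).toNat))
    (hnv : ¬ (3 ≤ b ∧ 0 < t ∧ t < (1:Int) <<< (b-2).toNat)) : solve_alt b t = (false, []) := by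
  simp only [solve_alt]
  rw [if_neg hns, if_pos hnv]

lemma A_valid (b t : Int) (hb : 3 ≤ b) (h0 : 0 < t) (hlt : t < 2 ^ (b-2).toNat) :
    solve b t = (true, gridSpec b.toNat (PySem.Int.bitLength t) t.toNat) := by
  have hn3 : 3 ≤ b.toNat := by omega
  set n := b.toNat with hndef
  set m := (b-2).toNat with hmdef
  set u := t.toNat with hudef
  set L := PySem.Int.bitLength t with hLdef
  have hcast : (((2:Nat)^m : Nat) : Int) = (2:Int)^m := pow_cast_int m
  have hmn : m = n - 2 := by omega
  have hult : u < 2^m := by omega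
  have hL1 : 1 ≤ L := bitLength_pos t h0
  have hu1 : 2^(L-1) ≤ u := by
    have h' := PySem.Int.two_pow_bitLength_le t (by omega)
    rw [← hLdef] at h'
    omega
  have hu2 : u < 2^L := by
    have h' := PySem.Int.lt_two_pow_bitLength t
    rw [← hLdef] at h'
    omega
  have hLm : L ≤ m := by
    by_contra hc
    have : (2:Nat)^m ≤ 2^(L-1) := Nat.pow_le_pow_right (by norm_num) (by omega)
    omega
  simp only [solve]
  rw [if_neg (by rintro ⟨_, he⟩; rw [← hmdef] at he; omega)]
  rw [show b - 2 - 1 = ((m:Nat):Int) - 1 by omega,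
    greedy_pos m t [] (by omega) (by omega)]
  rw [if_neg (by simp)]
  simp only [List.nil_append]
  obtain ⟨rest, hr⟩ := bitsDesc_head L hL1 m u hu1 hu2 hLm
  have hmaxb : PySem.List.pyGetD (bitsDesc m u) 0 0 = ((L-1 : Nat) : Int) := by
    rw [hr, PySem.List.pyGetD_zero_cons]
  simp only [← hudef]
  simp only [hmaxb, buildGrid_eq b, ← hndef]
  simp only [List.length_replicate]
  simp only [show (n:Int) - 2 = ((n-2 : Nat) : Int) by omega]
  have hstart : ([] : List Char) = onesL (n-2-(n-2)) := by simp [onesL, Nat.sub_self]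
  have hfill := fill_aux (((L-1 : Nat) : Int)) n (n-2) (List.replicate n (zeros n))
    (by simp) (by omega)
    (fun r hr' _ => getD_replicate_lt n r (zeros n) [] hr')
  rw [← hstart] at hfill
  simp only [hfill]
  -- row 0 and its length
  have hrow0 : (List.map (fun r =>
      if r ≤ n-2 ∧ ((n:Int)-1-(r:Int) ≤ ((L-1:Nat):Int)+1) then zeros (r+1) ++ onesL (n-1-r)
      else (List.replicate n (zeros n)).getD r []) (List.range n)).getD 0 [] =
      (if 0 ≤ n-2 ∧ ((n:Int)-1-((0:Nat):Int) ≤ ((L-1:Nat):Int)+1) then zeros (0+1) ++ onesL (n-1-0)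
      else (List.replicate n (zeros n)).getD 0 []) := by
    rw [List.getD_eq_getElem _ [] (by simp; omega)]
    simp only [List.getElem_map, List.getElem_range]
  have hla : ((PySem.List.pyGetD (List.map (fun r =>
      if r ≤ n-2 ∧ ((n:Int)-1-(r:Int) ≤ ((L-1:Nat):Int)+1) then zeros (r+1) ++ onesL (n-1-r)
      else (List.replicate n (zeros n)).getD r []) (List.range n)) 0 []).length : Int) = (n:Int) := by
    rw [PySem.List.pyGetD_zero, hrow0]
    split
    · simp [zeros, onesL]; omega
    · rw [getD_replicate_lt n 0 (zeros n) [] (by omega)]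
      simp [zeros]
  simp only [hla]
  simp only [foldl_if_append]
  simp only [PySem.List.pyRange_zero, List.map_map, Int.toNat_natCast]
  rw [PySem.List.pySetD_of_nonneg _ _ (le_refl 0)]
  simp only [Prod.mk.injEq, true_and, List.nil_append, Int.toNat_zero]
  unfold gridSpec
  apply List.ext_getElem (by simp; omega)
  intro i h1 h2
  simp only [List.getElem_map]
  rcases Nat.eq_zero_or_pos i with rfl | hpos
  · rw [List.getElem_set_self (by simp; omega)]
    simp only [List.getElem_cons_zero]
    congr 1
    apply List.map_congr_left
    intro j hj
    rw [List.mem_range] at hj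
    simp only [Function.comp]
    by_cases hj1 : j + 2 ≤ n
    · rcases Nat.eq_zero_or_pos j with rfl | hjpos
      · rw [if_neg (by
            rw [show (n:Int) - (((0:Nat):Int) + 2) = ((n-2 : Nat) : Int) by omega,
              natCast_mem_bitsDesc]
            rintro ⟨hlt', _⟩
            omega),
          if_neg (by
            rintro ⟨_, hbit⟩
            rw [show n - 0 - 2 = m by omega] at hbit
            rw [Nat.testBit_lt_two_pow hult] at hbit
            exact Bool.false_ne_true hbit)]
      · rw [show (n:Int) - ((j:Int) + 2) = ((n-j-2 : Nat) : Int) by omega]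
        by_cases hbit : u.testBit (n-j-2) = true
        · rw [if_pos (by rw [natCast_mem_bitsDesc]; exact ⟨by omega, hbit⟩),
            if_pos ⟨hj1, hbit⟩]
        · rw [if_neg (by rw [natCast_mem_bitsDesc]; rintro ⟨_, hb'⟩; exact hbit hb'),
            if_neg (by rintro ⟨_, hb'⟩; exact hbit hb')]
    · rw [if_neg (neg_not_mem_bitsDesc m u _ (by omega)),
        if_neg (by rintro ⟨h, _⟩; omega)]
  · obtain ⟨i', rfl⟩ : ∃ i', i = i' + 1 := ⟨i - 1, by omega⟩
    have hi'lt : i' + 1 < n := by simp at h1; omega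
    rw [List.getElem_set_ne (by omega), List.getElem_map, List.getElem_range,
      List.getElem_cons_succ, List.getElem_map, List.getElem_range'_1]
    by_cases htop : i' + 1 ≤ n - 2
    · by_cases hd : n - 1 - (1 + i') ≤ L
      · rw [if_pos ⟨htop, by omega⟩, if_pos hd,
          show n - (n - 1 - (1 + i')) = i' + 1 + 1 by omega,
          show n - 1 - (i' + 1) = n - 1 - (1 + i') by omega]
      · rw [if_neg (by rintro ⟨_, hX⟩; omega), if_neg hd,
          getD_replicate_lt n (i' + 1) (zeros n) [] (by omega)]
    · have hieq : i' + 1 = n - 1 := by omega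
      rw [if_neg (by rintro ⟨hX, _⟩; omega), if_pos (by omega),
        getD_replicate_lt n (i' + 1) (zeros n) [] (by omega),
        show n - (n - 1 - (1 + i')) = n by omega,
        show n - 1 - (1 + i') = 0 by omega]
      simp [onesL]


lemma B_valid (b t : Int) (hb : 3 ≤ b) (h0 : 0 < t) (hlt : t < (1:Int) <<< (b-2).toNat) :
    solve_alt b t = (true, gridSpec b.toNat (PySem.Int.bitLength t) t.toNat) := by
  have hn3 : 3 ≤ b.toNat := by omega
  set n := b.toNat with hndef
  set u := t.toNat with hudef
  set L := PySem.Int.bitLength t with hLdef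
  have hL1 : 1 ≤ L := bitLength_pos t h0
  simp only [solve_alt]
  rw [if_neg (by
      rintro ⟨_, he⟩
      rw [int_one_shiftLeft] at he hlt
      omega),
    if_neg (not_not_intro ⟨hb, h0, hlt⟩)]
  unfold gridSpec
  simp only [Prod.mk.injEq, true_and, ← hndef, ← hLdef, List.cons.injEq]
  constructor
  · congr 1
    apply List.ext_getElem (by simp; omega)
    intro j h1 h2
    simp only [List.getElem_map, List.getElem_range] at h1 ⊢
    by_cases hj : j < n - 1
    · rw [List.getElem_append_left (by simpa using hj)]
      simp only [List.getElem_map, List.getElem_range]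
      rw [show t = ((u:Nat):Int) by omega, band_shift_testBit]
      by_cases hbit : u.testBit (n - j - 2) = true
      · rw [if_pos hbit, if_pos ⟨by omega, hbit⟩]
      · rw [if_neg hbit, if_neg (by rintro ⟨_, h'⟩; exact hbit h')]
    · have : j = n - 1 := by simp at h2; omega
      subst this
      rw [List.getElem_append_right (by simpa using hj)]
      rw [if_neg (by rintro ⟨hj2, _⟩; omega)]
      simp
  · apply List.map_congr_left
    intro r hr
    rw [List.mem_range'] at hr
    by_cases hd : n - 1 - r ≤ L
    · rw [if_pos (by omega), if_pos hd]
      rfl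
    · rw [if_neg (by omega), if_neg hd]
      rfl


-- ===== VERDICT (by name: the statement is the Claim_ definition above) =====
theorem solve_spec : Claim_equal_solve := by
  unfold Claim_equal_solve
  intro b t _ hpre
  unfold Pre_solve at hpre
  unfold Spec_solve
  by_cases hsp : 0 ≤ b - 2 ∧ t = 2 ^ (b-2).toNat
  · rw [A_special b t hsp.1 hsp.2, B_special b t hsp.1 (by rw [int_one_shiftLeft]; exact hsp.2)]
  · by_cases hval : 3 ≤ b ∧ 0 < t ∧ t < 2 ^ (b-2).toNat
    · rw [A_valid b t hval.1 hval.2.1 hval.2.2,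
        B_valid b t hval.1 hval.2.1 (by rw [int_one_shiftLeft]; exact hval.2.2)]
    · rw [A_invalid b t hsp hpre hval,
        B_invalid b t
          (by rintro ⟨h1, h2⟩; rw [int_one_shiftLeft] at h2; exact hsp ⟨h1, h2⟩)
          (by rintro ⟨h1, h2, h3⟩; rw [int_one_shiftLeft] at h3; exact hval ⟨h1, h2, h3⟩)]
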